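-- pv_equiv track=rewrite | github.com/ourofoundation/ggen | scripts/phonons.py | get_adaptive_supercell
-- ===== SOURCE A (Python) =====
-- from typing import List, Optional, Tuple
--
-- def get_adaptive_supercell(
--     num_atoms: int,
--     min_supercell_atoms: int = 150,
--     max_dim: int = 5,
-- ) -> Tuple[int, int, int]:
--     """
--     Determine supercell dimensions to reach a minimum atom count.
--     Minimum supercell size is 3x3x3.
--
--     Small supercells can produce spurious imaginary modes due to:
--     - Force constant truncation at supercell boundaries
--     - Incomplete Brillouin zone sampling
--     - Unphysical periodic image interactions
--
--     Args:
--         num_atoms: Number of atoms in the unit cell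
--         min_supercell_atoms: Target minimum atoms in supercell (default: 150)
--         max_dim: Maximum supercell dimension (default: 4)
--
--     Returns:
--         Tuple of supercell dimensions (n, n, n)
--     """
--     for n in range(3, max_dim + 1):
--         if num_atoms * (n**3) >= min_supercell_atoms:
--             return (n, n, n)
--     return (max_dim, max_dim, max_dim)
-- ===== SOURCE B (Python) =====
-- def get_adaptive_supercell(num_atoms, min_supercell_atoms=150, max_dim=5):
--     # Binary search for the smallest n in [3, max_dim] with num_atoms*n**3 >= target.
--     if max_dim < 3:
--         return (max_dim, max_dim, max_dim)
--     if num_atoms * 27 >= min_supercell_atoms: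
--         return (3, 3, 3)
--     if num_atoms <= 0 or num_atoms * max_dim ** 3 < min_supercell_atoms:
--         return (max_dim, max_dim, max_dim)
--     lo, hi = 3, max_dim  # invariant: lo fails the condition, hi satisfies it
--     while hi - lo > 1:
--         mid = (lo + hi) // 2
--         if num_atoms * mid ** 3 >= min_supercell_atoms:
--             hi = mid
--         else:
--             lo = mid
--     return (hi, hi, hi)
-- ===== Notes on version B (the rewrite author's own statement) =====
-- stated objective: alternative
-- what changed: Replaces A's linear scan over range(3, max_dim+1) by closed-form edge checks plus a binary search for the smallest n with num_atoms*n**3 >= min_supercell_atoms.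
import Mathlib
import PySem

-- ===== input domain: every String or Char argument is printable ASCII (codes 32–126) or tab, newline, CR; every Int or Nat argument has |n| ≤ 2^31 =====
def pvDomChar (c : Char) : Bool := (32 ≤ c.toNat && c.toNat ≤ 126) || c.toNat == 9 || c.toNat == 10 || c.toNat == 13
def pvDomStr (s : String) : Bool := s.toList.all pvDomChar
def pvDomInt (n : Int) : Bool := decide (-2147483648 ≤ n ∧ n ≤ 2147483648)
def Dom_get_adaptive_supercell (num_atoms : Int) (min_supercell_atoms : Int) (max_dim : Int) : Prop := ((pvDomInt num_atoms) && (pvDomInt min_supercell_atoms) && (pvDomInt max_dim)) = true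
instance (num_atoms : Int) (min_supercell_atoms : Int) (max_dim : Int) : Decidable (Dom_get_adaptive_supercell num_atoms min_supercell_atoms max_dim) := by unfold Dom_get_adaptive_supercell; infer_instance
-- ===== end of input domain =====

-- B replaces A's linear scan over range(3, max_dim+1) by a binary search for the
-- smallest n with num_atoms*n^3 >= min_supercell_atoms (after closed-form edge checks).

-- ===== PORT A =====
-- A's for-loop with early return, as structural recursion over the range list
def pvGoA : List Int → Int → Int → Int → Int × Int × Int
  | [], _, _, md => (md, md, md)
  | n :: rest, na, msa, md =>
      if na * n ^ 3 ≥ msa then (n, n, n) else pvGoA rest na msa md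

def get_adaptive_supercell (num_atoms : Int) (min_supercell_atoms : Int) (max_dim : Int) : Int × Int × Int :=
  pvGoA (PySem.List.pyRange 3 (max_dim + 1) 1) num_atoms min_supercell_atoms max_dim

-- ===== PORT B =====
-- B's while-loop: binary search maintaining "lo fails, hi satisfies"
def pvBSearch (na msa : Int) (lo hi : Int) : Int :=
  if h : hi - lo > 1 then
    let mid := PySem.Int.floordiv (lo + hi) 2
    if na * mid ^ 3 ≥ msa then pvBSearch na msa lo mid else pvBSearch na msa mid hi
  else hi
termination_by (hi - lo).toNat
decreasing_by
  · have := PySem.Int.floordiv_eq_iff_of_pos (a := lo + hi) (b := 2) (q := PySem.Int.floordiv (lo + hi) 2) (by omega) |>.mp rfl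
    omega
  · have := PySem.Int.floordiv_eq_iff_of_pos (a := lo + hi) (b := 2) (q := PySem.Int.floordiv (lo + hi) 2) (by omega) |>.mp rfl
    omega

def get_adaptive_supercell_alt (num_atoms : Int) (min_supercell_atoms : Int) (max_dim : Int) : Int × Int × Int :=
  if max_dim < 3 then (max_dim, max_dim, max_dim)
  else if num_atoms * 27 ≥ min_supercell_atoms then (3, 3, 3)
  else if num_atoms ≤ 0 ∨ num_atoms * max_dim ^ 3 < min_supercell_atoms then (max_dim, max_dim, max_dim)
  else
    let hi := pvBSearch num_atoms min_supercell_atoms 3 max_dim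
    (hi, hi, hi)

-- ===== PRECONDITION & SPEC =====
def Spec_get_adaptive_supercell (num_atoms : Int) (min_supercell_atoms : Int) (max_dim : Int) (out : Int × Int × Int) : Prop := out = get_adaptive_supercell_alt num_atoms min_supercell_atoms max_dim
instance (num_atoms : Int) (min_supercell_atoms : Int) (max_dim : Int) (out : Int × Int × Int) : Decidable (Spec_get_adaptive_supercell num_atoms min_supercell_atoms max_dim out) := by unfold Spec_get_adaptive_supercell; infer_instance

-- ===== CLAIM (what is proved, stated in full; the proofs are below) =====
def Claim_equal_get_adaptive_supercell : Prop := ∀ (num_atoms : Int) (min_supercell_atoms : Int) (max_dim : Int), Dom_get_adaptive_supercell num_atoms min_supercell_atoms max_dim → Spec_get_adaptive_supercell num_atoms min_supercell_atoms max_dim (get_adaptive_supercell num_atoms min_supercell_atoms max_dim)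

-- ===== LEMMAS AND PROOFS =====

-- if every element of the range fails the condition, A returns the fallback
theorem pvGoA_none (na msa md : Int) :
    ∀ (b a : Int), (∀ k : Int, a ≤ k → k < b → ¬ (na * k ^ 3 ≥ msa)) →
      pvGoA (PySem.List.pyRange a b 1) na msa md = (md, md, md) := by
  intro b a
  induction hn : (b - a).toNat generalizing a with
  | zero =>
    intro _
    rw [PySem.List.pyRange_one_eq_nil (by omega)]
    rfl
  | succ n ih =>
    intro hfail
    rw [PySem.List.pyRange_one_cons (by omega)]
    simp only [pvGoA]
    rw [if_neg (hfail a (le_refl a) (by omega))]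
    exact ih (a + 1) (by omega) (fun k hk1 hk2 => hfail k (by omega) hk2)

-- if m is the first element of the range satisfying the condition, A returns (m,m,m)
theorem pvGoA_found (na msa md m : Int)
    (hm : na * m ^ 3 ≥ msa) :
    ∀ (a b : Int), a ≤ m → m < b →
      (∀ k : Int, a ≤ k → k < m → ¬ (na * k ^ 3 ≥ msa)) →
      pvGoA (PySem.List.pyRange a b 1) na msa md = (m, m, m) := by
  intro a
  induction hn : (m - a).toNat generalizing a with
  | zero =>
    intro b ham hmb _
    have : a = m := by omega
    subst this
    rw [PySem.List.pyRange_one_cons (by omega)]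
    simp only [pvGoA]
    rw [if_pos hm]
  | succ n ih =>
    intro b ham hmb hfail
    rw [PySem.List.pyRange_one_cons (by omega)]
    simp only [pvGoA]
    rw [if_neg (hfail a (le_refl a) (by omega))]
    exact ih (a + 1) (by omega) b (by omega) hmb (fun k hk1 hk2 => hfail k (by omega) hk2)

-- binary search invariant: from "lo fails, hi satisfies", the result r satisfies
-- the condition, r-1 fails it, and lo < r ≤ hi
theorem pvBSearch_spec (na msa : Int) :
    ∀ (n : Nat) (lo hi : Int), (hi - lo).toNat = n →
      ¬ (na * lo ^ 3 ≥ msa) → na * hi ^ 3 ≥ msa → lo < hi →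
      (na * (pvBSearch na msa lo hi) ^ 3 ≥ msa ∧
       ¬ (na * (pvBSearch na msa lo hi - 1) ^ 3 ≥ msa) ∧
       lo < pvBSearch na msa lo hi ∧ pvBSearch na msa lo hi ≤ hi) := by
  intro n
  induction n using Nat.strong_induction_on with
  | _ n ih =>
    intro lo hi hn hlo hhi hlt
    rw [pvBSearch]
    by_cases h : hi - lo > 1
    · rw [dif_pos h]
      have hmid := PySem.Int.floordiv_eq_iff_of_pos (a := lo + hi) (b := 2)
        (q := PySem.Int.floordiv (lo + hi) 2) (by omega) |>.mp rfl
      set mid := PySem.Int.floordiv (lo + hi) 2 with hmdef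
      by_cases hc : na * mid ^ 3 ≥ msa
      · rw [if_pos hc]
        have := ih (mid - lo).toNat (by omega) lo mid rfl hlo hc (by omega)
        exact ⟨this.1, this.2.1, this.2.2.1, le_trans this.2.2.2 (by omega)⟩
      · rw [if_neg hc]
        have := ih (hi - mid).toNat (by omega) mid hi rfl hc hhi (by omega)
        exact ⟨this.1, this.2.1, lt_of_le_of_lt (by omega : lo ≤ mid) this.2.2.1, this.2.2.2⟩
    · rw [dif_neg h]
      have : hi - 1 = lo := by omega
      exact ⟨hhi, by rw [this]; exact hlo, hlt, le_refl hi⟩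

-- monotonicity of the condition for positive num_atoms
theorem pvCond_mono (na msa k m : Int) (hna : 0 < na) (h3 : 0 ≤ k) (hkm : k ≤ m)
    (h : na * k ^ 3 ≥ msa) : na * m ^ 3 ≥ msa := by
  have : k ^ 3 ≤ m ^ 3 := by
    apply pow_le_pow_left₀ h3 hkm
  nlinarith

-- ===== VERDICT (by name: the statement is the Claim_ definition above) =====
theorem get_adaptive_supercell_spec : Claim_equal_get_adaptive_supercell := by
  intro na msa md _
  unfold Spec_get_adaptive_supercell get_adaptive_supercell get_adaptive_supercell_alt
  by_cases h1 : md < 3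
  · rw [if_pos h1, PySem.List.pyRange_one_eq_nil (by omega)]
    rfl
  · rw [if_neg h1]
    by_cases h2 : na * 27 ≥ msa
    · rw [if_pos h2, PySem.List.pyRange_one_cons (by omega)]
      simp only [pvGoA]
      rw [if_pos (by norm_num; omega : na * (3:Int) ^ 3 ≥ msa)]
    · rw [if_neg h2]
      by_cases h3 : na ≤ 0 ∨ na * md ^ 3 < msa
      · rw [if_pos h3]
        apply pvGoA_none
        intro k hk1 hk2
        rcases h3 with h3 | h3
        · -- na ≤ 0: the condition fails at 3 and only gets smaller
          intro hc
          have hk27 : (27:Int) ≤ k ^ 3 := by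
            have := pow_le_pow_left₀ (by norm_num : (0:Int) ≤ 3) hk1 3
            norm_num at this; omega
          nlinarith
        · -- na > 0 here is not known, split
          by_cases hna : na ≤ 0
          · intro hc
            have hk27 : (27:Int) ≤ k ^ 3 := by
              have := pow_le_pow_left₀ (by norm_num : (0:Int) ≤ 3) hk1 3
              norm_num at this; omega
            nlinarith
          · intro hc
            exact absurd (pvCond_mono na msa k md (by omega) (by omega) (by omega) hc) (by omega)
      · rw [if_neg h3]
        obtain ⟨hna', hmd'⟩ := not_or.mp h3
        have hna : 0 < na := by omega
        have hmd : na * md ^ 3 ≥ msa := by omega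
        have hlt : (3:Int) < md := by
          by_contra hcon
          have : md = 3 := by omega
          subst this
          norm_num at hmd
          omega
        have hB := pvBSearch_spec na msa (md - 3).toNat 3 md rfl
          (by norm_num; omega) hmd hlt
        set r := pvBSearch na msa 3 md with hr
        apply pvGoA_found na msa md r hB.1 3 (md + 1) (by omega) (by omega)
        intro k hk1 hk2 hc
        exact hB.2.1 (pvCond_mono na msa k (r - 1) (by omega) (by omega) (by omega) hc)
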